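-- pv_equiv track=rewrite | github.com/ellikon/HighestValueLongestCommonSequence | HighestValueLongestCommonSequence.py | HVLCS
-- ===== SOURCE A (Python) =====
-- values = {
--     "a": 2,
--     "b": 4,
--     "c": 5
-- }
--
-- A = "aacb"
--
-- B = "caab"
--
-- def HVLCS(A,B, values):
--     M = [[0 for _ in range(len(B) + 1)] for _ in range(len(A) + 1)]
--
--     for i in range(1, len(A) + 1):
--         for j in range(1, len(B) + 1):
--             if A[i - 1] == B[j - 1]:
--                 M[i][j] = max(values[A[i - 1]] + M[i - 1][j - 1],
--                               M[i - 1][j], M[i][j - 1])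
--             else:
--                 M[i][j] = max(M[i - 1][j], M[i][j - 1])
--
--     return M, M[len(A)][len(B)]
-- ===== SOURCE B (Python) =====
-- def HVLCS(A, B, values):
--     # Top-down memoized recursion over cells instead of A's bottom-up double loop.
--     memo = {}
--
--     def rec(i, j):
--         if i == 0 or j == 0:
--             return 0
--         if (i, j) in memo:
--             return memo[(i, j)]
--         if A[i - 1] == B[j - 1]:
--             r = max(values[A[i - 1]] + rec(i - 1, j - 1), rec(i - 1, j), rec(i, j - 1))
--         else:
--             r = max(rec(i - 1, j), rec(i, j - 1))
--         memo[(i, j)] = r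
--         return r
--
--     M = [[rec(i, j) for j in range(len(B) + 1)] for i in range(len(A) + 1)]
--     return M, M[len(A)][len(B)]
-- ===== Notes on version B (the rewrite author's own statement) =====
-- stated objective: alternative
-- what changed: Replaces A's bottom-up nested index loops mutating a preallocated matrix by top-down memoized recursion: a recursive rec(i,j) with a memo dict computes each cell from its three dependencies on demand, and the matrix is assembled by querying rec for every cell.
import Mathlib
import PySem

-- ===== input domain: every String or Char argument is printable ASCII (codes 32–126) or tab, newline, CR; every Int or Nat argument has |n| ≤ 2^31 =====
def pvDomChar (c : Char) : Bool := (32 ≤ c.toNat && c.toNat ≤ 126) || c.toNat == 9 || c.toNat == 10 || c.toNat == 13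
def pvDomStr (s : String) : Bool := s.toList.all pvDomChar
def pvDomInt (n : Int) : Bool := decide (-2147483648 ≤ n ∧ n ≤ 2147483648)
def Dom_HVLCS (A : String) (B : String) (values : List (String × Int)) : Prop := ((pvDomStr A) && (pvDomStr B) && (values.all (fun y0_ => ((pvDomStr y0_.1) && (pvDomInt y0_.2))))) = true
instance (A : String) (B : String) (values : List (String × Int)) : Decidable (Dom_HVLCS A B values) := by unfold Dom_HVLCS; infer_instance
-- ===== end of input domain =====

-- B replaces A's bottom-up nested index loops over a preallocated matrix by top-down
-- memoized recursion (a rec(i,j) with a memo dict, the matrix assembled by querying rec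
-- for every cell); same asymptotic cost, different decomposition.

-- ===== PORT A =====
-- values[c]: association-list dict, first match; the default 0 is never reached under Pre_HVLCS
-- (Pre_ excludes exactly the KeyError inputs).
def pvVal (values : List (String × Int)) (c : Char) : Int :=
  (PySem.Dict.mk values).getD (String.mk [c]) 0

def HVLCS (A : String) (B : String) (values : List (String × Int)) : List (List Int) × Int :=
  let as := A.toList
  let bs := B.toList
  let la : Int := as.length
  let lb : Int := bs.length
  -- M = [[0 for _ in range(len(B)+1)] for _ in range(len(A)+1)]
  let M0 : List (List Int) :=
    (PySem.List.pyRange 0 (la + 1) 1).map (fun _ =>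
      (PySem.List.pyRange 0 (lb + 1) 1).map (fun _ => (0 : Int)))
  -- nested for-loops mutating M[i][j]; all indices are in range, so pyGetD/pySetD are exact
  let M := (PySem.List.pyRange 1 (la + 1) 1).foldl (fun M i =>
    (PySem.List.pyRange 1 (lb + 1) 1).foldl (fun M j =>
      let ai := PySem.List.pyGetD as (i - 1) ' '
      let bj := PySem.List.pyGetD bs (j - 1) ' '
      let v : Int :=
        if ai = bj then
          max (pvVal values ai + PySem.List.pyGetD (PySem.List.pyGetD M (i - 1) []) (j - 1) 0)
            (max (PySem.List.pyGetD (PySem.List.pyGetD M (i - 1) []) j 0)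
              (PySem.List.pyGetD (PySem.List.pyGetD M i []) (j - 1) 0))
        else
          max (PySem.List.pyGetD (PySem.List.pyGetD M (i - 1) []) j 0)
            (PySem.List.pyGetD (PySem.List.pyGetD M i []) (j - 1) 0)
      PySem.List.pySetD M i (PySem.List.pySetD (PySem.List.pyGetD M i []) j v)) M) M0
  (M, PySem.List.pyGetD (PySem.List.pyGetD M la []) lb 0)

-- ===== PORT B =====
-- Source B's rec(i, j): memoized recursion; '(i,j) in memo … memo[(i,j)]' is the get? match,
-- 'memo[(i,j)] = r' is the insert.  Indices passed by Source B are always in range, so the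
-- getD defaults are exact; the recursion terminates because i + j decreases in every call.
def pvRec (asL bsL : List Char) (vv : Char → Int) (i j : Nat)
    (memo : PySem.Dict (Int × Int) Int) : PySem.Dict (Int × Int) Int × Int :=
  if h : i = 0 ∨ j = 0 then (memo, 0)
  else
    match memo.get? ((i : Int), (j : Int)) with
    | some v => (memo, v)
    | none =>
      let r :=
        if asL.getD (i - 1) ' ' = bsL.getD (j - 1) ' ' then
          let p1 := pvRec asL bsL vv (i - 1) (j - 1) memo
          let p2 := pvRec asL bsL vv (i - 1) j p1.1
          let p3 := pvRec asL bsL vv i (j - 1) p2.1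
          (p3.1, max (vv (asL.getD (i - 1) ' ') + p1.2) (max p2.2 p3.2))
        else
          let p2 := pvRec asL bsL vv (i - 1) j memo
          let p3 := pvRec asL bsL vv i (j - 1) p2.1
          (p3.1, max p2.2 p3.2)
      (r.1.insert ((i : Int), (j : Int)) r.2, r.2)
termination_by i + j
decreasing_by all_goals omega

-- M = [[rec(i, j) for j in range(len(B)+1)] for i in range(len(A)+1)], threading the memo
def HVLCS_alt (A : String) (B : String) (values : List (String × Int)) : List (List Int) × Int :=
  let asL := A.toList
  let bsL := B.toList
  let vv := pvVal values
  let st := (PySem.List.pyRange 0 ((asL.length : Int) + 1) 1).foldl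
    (fun (st : PySem.Dict (Int × Int) Int × List (List Int)) i =>
      let st2 := (PySem.List.pyRange 0 ((bsL.length : Int) + 1) 1).foldl
        (fun (st2 : PySem.Dict (Int × Int) Int × List Int) j =>
          let p := pvRec asL bsL vv i.toNat j.toNat st2.1
          (p.1, st2.2 ++ [p.2])) (st.1, ([] : List Int))
      (st2.1, st.2 ++ [st2.2])) (PySem.Dict.mk [], ([] : List (List Int)))
  (st.2, PySem.List.pyGetD (PySem.List.pyGetD st.2 (asL.length : Int) []) (bsL.length : Int) 0)

-- ===== PRECONDITION & SPEC =====
-- Pre_ excludes exactly the inputs where the Python raises KeyError: a character occurring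
-- in both A and B whose one-character string is not a key of values (both A and B raise there).
def Pre_HVLCS (A : String) (B : String) (values : List (String × Int)) : Prop :=
  (A.toList.all (fun c =>
    !(B.toList.contains c) || (PySem.Dict.mk values).contains (String.mk [c]))) = true
instance (A : String) (B : String) (values : List (String × Int)) : Decidable (Pre_HVLCS A B values) := by unfold Pre_HVLCS; infer_instance

def pvWitness_HVLCS : String × String × (List (String × Int)) :=
  ("ab", "ba", [("a", 2), ("b", 4)])

def Spec_HVLCS (A : String) (B : String) (values : List (String × Int)) (out : List (List Int) × Int) : Prop := out = HVLCS_alt A B values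
instance (A : String) (B : String) (values : List (String × Int)) (out : List (List Int) × Int) : Decidable (Spec_HVLCS A B values out) := by unfold Spec_HVLCS; infer_instance

-- ===== CLAIM (what is proved, stated in full; the proofs are below) =====
def Claim_equal_HVLCS : Prop := ∀ (A : String) (B : String) (values : List (String × Int)), Dom_HVLCS A B values → Pre_HVLCS A B values → Spec_HVLCS A B values (HVLCS A B values)

-- ===== LEMMAS AND PROOFS =====

-- the canonical DP table value, recursive on i + j
def pvT (vv : Char → Int) (asL bsL : List Char) (i j : Nat) : Int :=
  if h : i = 0 ∨ j = 0 then 0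
  else if asL.getD (i - 1) ' ' = bsL.getD (j - 1) ' ' then
    max (vv (asL.getD (i - 1) ' ') + pvT vv asL bsL (i - 1) (j - 1))
      (max (pvT vv asL bsL (i - 1) j) (pvT vv asL bsL i (j - 1)))
  else max (pvT vv asL bsL (i - 1) j) (pvT vv asL bsL i (j - 1))
termination_by i + j
decreasing_by all_goals omega

def pvRowT (vv : Char → Int) (asL bsL : List Char) (i : Nat) : List Int :=
  (List.range (bsL.length + 1)).map (fun j => pvT vv asL bsL i j)

lemma pvT_pos (vv : Char → Int) (asL bsL : List Char) (i j : Nat) (h : ¬(i = 0 ∨ j = 0)) :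
    pvT vv asL bsL i j =
      if asL.getD (i - 1) ' ' = bsL.getD (j - 1) ' ' then
        max (vv (asL.getD (i - 1) ' ') + pvT vv asL bsL (i - 1) (j - 1))
          (max (pvT vv asL bsL (i - 1) j) (pvT vv asL bsL i (j - 1)))
      else max (pvT vv asL bsL (i - 1) j) (pvT vv asL bsL i (j - 1)) := by
  conv_lhs => rw [pvT]
  rw [dif_neg h]

lemma pvT_zero (vv : Char → Int) (asL bsL : List Char) (i j : Nat) (h : i = 0 ∨ j = 0) :
    pvT vv asL bsL i j = 0 := by rw [pvT, dif_pos h]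

-- ---------- A-side machinery: A's nested loops build rows functionally ----------

-- a functional per-row construction used only in the proofs
def pvStep (vv : Char → Int) (ca : Char) (st : List Int × Int) (t : Char × Int × Int) :
    List Int × Int :=
  let cur := if ca = t.1 then max (vv ca + t.2.1) (max t.2.2 st.2) else max t.2.2 st.2
  (st.1 ++ [cur], cur)

def pvTrips (bs : List Char) (prev : List Int) : List (Char × Int × Int) :=
  bs.zip (prev.zip (prev.drop 1))

def pvNextRow (vv : Char → Int) (ca : Char) (bs : List Char) (prev : List Int) : List Int :=
  ((pvTrips bs prev).foldl (pvStep vv ca) ([0], 0)).1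

-- A's inner loop body, named for the proofs
def pvAStep (values : List (String × Int)) (as bs : List Char) (i : Int)
    (M : List (List Int)) (j : Int) : List (List Int) :=
  let ai := PySem.List.pyGetD as (i - 1) ' '
  let bj := PySem.List.pyGetD bs (j - 1) ' '
  let v : Int :=
    if ai = bj then
      max (pvVal values ai + PySem.List.pyGetD (PySem.List.pyGetD M (i - 1) []) (j - 1) 0)
        (max (PySem.List.pyGetD (PySem.List.pyGetD M (i - 1) []) j 0)
          (PySem.List.pyGetD (PySem.List.pyGetD M i []) (j - 1) 0))
    else
      max (PySem.List.pyGetD (PySem.List.pyGetD M (i - 1) []) j 0)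
        (PySem.List.pyGetD (PySem.List.pyGetD M i []) (j - 1) 0)
  PySem.List.pySetD M i (PySem.List.pySetD (PySem.List.pyGetD M i []) j v)

lemma pvTrips_length (bs : List Char) (prev : List Int) (h : prev.length = bs.length + 1) :
    (pvTrips bs prev).length = bs.length := by
  simp [pvTrips, h]

lemma pvTrips_getElem (bs : List Char) (prev : List Int) (h : prev.length = bs.length + 1)
    (k : Nat) (hk : k < bs.length) :
    (pvTrips bs prev)[k]'(by rw [pvTrips_length bs prev h]; exact hk) =
      (bs[k], prev[k]'(by omega), prev[k+1]'(by omega)) := by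
  simp [pvTrips, List.getElem_zip]

-- fold-state invariant: fst grows by one per triple and snd is the last entry of fst
lemma pvFoldB_inv (vv : Char → Int) (ca : Char) :
    ∀ (l : List (Char × Int × Int)) (row : List Int) (left : Int),
      row ≠ [] → row.getD (row.length - 1) 0 = left →
      (l.foldl (pvStep vv ca) (row, left)).1.length = row.length + l.length ∧
      (l.foldl (pvStep vv ca) (row, left)).1 ≠ [] ∧
      (l.foldl (pvStep vv ca) (row, left)).1.getD
        ((l.foldl (pvStep vv ca) (row, left)).1.length - 1) 0 =
        (l.foldl (pvStep vv ca) (row, left)).2 := by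
  intro l
  induction l with
  | nil => intro row left h1 h2; simpa using ⟨h1, h2⟩
  | cons t l ih =>
    intro row left h1 h2
    simp only [List.foldl_cons]
    have := ih (row ++ [if ca = t.1 then max (vv ca + t.2.1) (max t.2.2 left) else max t.2.2 left])
      (if ca = t.1 then max (vv ca + t.2.1) (max t.2.2 left) else max t.2.2 left)
      (by simp) (by simp [List.getD_eq_getElem?_getD])
    simp only [pvStep] at this ⊢
    constructor
    · rw [this.1]; simp; omega
    · exact ⟨this.2.1, this.2.2⟩

-- prefix fold of the functional row, for the inner induction
def pvPre (vv : Char → Int) (ca : Char) (bs : List Char) (prev : List Int) (k : Nat) :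
    List Int × Int :=
  ((pvTrips bs prev).take k).foldl (pvStep vv ca) ([0], 0)

lemma pvPre_inv (vv : Char → Int) (ca : Char) (bs : List Char) (prev : List Int)
    (h : prev.length = bs.length + 1) (k : Nat) (hk : k ≤ bs.length) :
    (pvPre vv ca bs prev k).1.length = k + 1 ∧
    (pvPre vv ca bs prev k).1.getD k 0 = (pvPre vv ca bs prev k).2 := by
  have := pvFoldB_inv vv ca ((pvTrips bs prev).take k) [0] 0 (by simp) (by simp)
  rw [show (List.foldl (pvStep vv ca) ([0], 0) (List.take k (pvTrips bs prev))) = pvPre vv ca bs prev k from rfl] at this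
  have hlen : ((pvTrips bs prev).take k).length = k := by
    rw [List.length_take, pvTrips_length bs prev h]; omega
  have h1 : (pvPre vv ca bs prev k).1.length = k + 1 := by
    rw [this.1, hlen]; simp [Nat.add_comm]
  refine ⟨h1, ?_⟩
  have h3 := this.2.2
  rw [this.1, hlen] at h3
  simpa using h3

lemma pvPre_succ (vv : Char → Int) (ca : Char) (bs : List Char) (prev : List Int)
    (h : prev.length = bs.length + 1) (k : Nat) (hk : k < bs.length) :
    pvPre vv ca bs prev (k + 1) =
      pvStep vv ca (pvPre vv ca bs prev k)
        (bs[k], prev[k]'(by omega), prev[k+1]'(by omega)) := by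
  have hk' : k < (pvTrips bs prev).length := by rw [pvTrips_length bs prev h]; exact hk
  rw [pvPre, List.take_add_one, List.getElem?_eq_getElem hk']
  rw [List.foldl_append]
  rw [pvTrips_getElem bs prev h k hk]
  rfl

-- the inner loop of A writes exactly the functional row prefix into row i, keeping zeros beyond
lemma pvInner_loop (values : List (String × Int)) (as bs : List Char) (prev : List Int)
    (hprev : prev.length = bs.length + 1) (i : Nat) (hi : 1 ≤ i)
    (Mstart : List (List Int)) (hiM : i < Mstart.length)
    (hMp : Mstart.getD (i - 1) [] = prev)
    (hMi : Mstart.getD i [] = List.replicate (bs.length + 1) 0) :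
    ∀ k, k ≤ bs.length →
      (List.range k).foldl (fun (M : List (List Int)) (t : Nat) => pvAStep values as bs (↑i) M (1 + (t : Int))) Mstart =
        Mstart.set i ((pvPre (pvVal values) (as.getD (i-1) ' ') bs prev k).1 ++
          List.replicate (bs.length - k) 0) := by
  intro k
  induction k with
  | zero =>
    intro _
    simp only [List.range_zero, List.foldl_nil, pvPre, List.take_zero, Nat.sub_zero]
    rw [show (([0], (0:Int)) : List Int × Int).1 ++ List.replicate bs.length (0:Int) =
          List.replicate (bs.length + 1) 0 by simp [List.replicate_succ]]
    rw [← hMi, List.getD_eq_getElem Mstart [] hiM, List.set_getElem_self]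
  | succ k ih =>
    intro hk1
    have hk : k < bs.length := by omega
    rw [List.range_succ, List.foldl_append, ih (by omega), List.foldl_cons, List.foldl_nil]
    set ca := as.getD (i-1) ' ' with hca
    set vv := pvVal values with hvv
    set pre := pvPre vv ca bs prev k with hpre
    have hpinv := pvPre_inv vv ca bs prev hprev k (by omega)
    rw [← hpre] at hpinv
    set rk : List Int := pre.1 ++ List.replicate (bs.length - k) 0 with hrk
    have hcast1 : ((i : Int) - 1) = ((i - 1 : Nat) : Int) := by omega
    have hcast2 : (1 + (k : Int)) = ((k + 1 : Nat) : Int) := by push_cast; ring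
    have hcast3 : (((k + 1 : Nat) : Int) - 1) = ((k : Nat) : Int) := by omega
    simp only [pvAStep, hcast1, hcast2, hcast3, PySem.List.pyGetD_natCast,
      PySem.List.pySetD_natCast]
    have hne : i ≠ i - 1 := by omega
    have hgp : (Mstart.set i rk).getD (i - 1) [] = prev := by
      rw [List.getD_eq_getElem?_getD, List.getElem?_set_ne hne, ← List.getD_eq_getElem?_getD, hMp]
    have hgi : (Mstart.set i rk).getD i [] = rk := by
      simp [List.getD_eq_getElem?_getD, hiM]
    rw [hgp, hgi]
    have hbk : bs.getD k ' ' = bs[k] := List.getD_eq_getElem bs ' ' hk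
    have hpk : prev.getD k 0 = prev[k]'(by omega) := List.getD_eq_getElem prev 0 (by omega)
    have hpk1 : prev.getD (k+1) 0 = prev[k+1]'(by omega) := List.getD_eq_getElem prev 0 (by omega)
    have hrkk : rk.getD k 0 = pre.2 := by
      rw [hrk, List.getD_eq_getElem?_getD, List.getElem?_append_left (by omega),
        ← List.getD_eq_getElem?_getD, hpinv.2]
    rw [hbk, hpk, hpk1, hrkk, ← hca, ← hvv]
    have hset : rk.set (k+1) (if ca = bs[k] then max (vv ca + prev[k]'(by omega))
          (max (prev[k+1]'(by omega)) pre.2) else max (prev[k+1]'(by omega)) pre.2) =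
        (pvPre vv ca bs prev (k+1)).1 ++ List.replicate (bs.length - (k+1)) 0 := by
      rw [pvPre_succ vv ca bs prev hprev k hk, ← hpre]
      rw [hrk, List.set_append_right _ _ (by omega), hpinv.1]
      rw [show k + 1 - (k+1) = 0 from by omega]
      rw [show bs.length - k = (bs.length - (k+1)) + 1 from by omega, List.replicate_succ]
      simp [pvStep, List.append_assoc]
    rw [hset, List.set_set]

lemma pvHVLCS_eq (A B : String) (values : List (String × Int)) :
    HVLCS A B values =
      (let as := A.toList
       let bs := B.toList
       let M := (PySem.List.pyRange 1 ((as.length : Int) + 1) 1).foldl (fun M i =>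
         (PySem.List.pyRange 1 ((bs.length : Int) + 1) 1).foldl (pvAStep values as bs i) M)
         ((PySem.List.pyRange 0 ((as.length : Int) + 1) 1).map (fun _ =>
           (PySem.List.pyRange 0 ((bs.length : Int) + 1) 1).map (fun _ => (0 : Int))))
       (M, PySem.List.pyGetD (PySem.List.pyGetD M (as.length : Int) []) (bs.length : Int) 0)) := rfl

-- the functional rows construction (proof-side counterpart of A's outer loop)
def pvRowsStep (vv : Char → Int) (bs : List Char) (st : List (List Int) × List Int)
    (ca : Char) : List (List Int) × List Int :=
  let row := pvNextRow vv ca bs st.2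
  (st.1 ++ [row], row)

def pvZ (lb : Nat) : List Int := List.replicate (lb + 1) 0

def pvRowsB (vv : Char → Int) (bs : List Char) (l : List Char) :
    List (List Int) × List Int :=
  l.foldl (pvRowsStep vv bs) ([pvZ bs.length], pvZ bs.length)

lemma pvNextRow_eq_pre (vv : Char → Int) (ca : Char) (bs : List Char) (prev : List Int)
    (h : prev.length = bs.length + 1) :
    pvNextRow vv ca bs prev = (pvPre vv ca bs prev bs.length).1 := by
  rw [pvNextRow, pvPre, List.take_of_length_le (by rw [pvTrips_length bs prev h])]

lemma pvNextRow_length (vv : Char → Int) (ca : Char) (bs : List Char) (prev : List Int)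
    (h : prev.length = bs.length + 1) :
    (pvNextRow vv ca bs prev).length = bs.length + 1 := by
  rw [pvNextRow_eq_pre vv ca bs prev h]
  exact (pvPre_inv vv ca bs prev h bs.length (le_refl _)).1

lemma pvRowsB_inv (vv : Char → Int) (bs : List Char) (l : List Char) :
    (pvRowsB vv bs l).1.length = l.length + 1 ∧
    (pvRowsB vv bs l).2.length = bs.length + 1 ∧
    (pvRowsB vv bs l).1.getD l.length [] = (pvRowsB vv bs l).2 := by
  induction l using List.reverseRecOn with
  | nil => simp [pvRowsB, pvZ]
  | append_singleton l c ih =>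
    rw [pvRowsB, List.foldl_append, List.foldl_cons, List.foldl_nil]
    rw [show List.foldl (pvRowsStep vv bs) ([pvZ bs.length], pvZ bs.length) l =
      pvRowsB vv bs l from rfl]
    refine ⟨by simp [pvRowsStep, ih.1], ?_, ?_⟩
    · exact pvNextRow_length vv c bs _ ih.2.1
    · simp only [pvRowsStep, List.length_append]
      rw [List.getD_eq_getElem?_getD, List.getElem?_append_right (by simp [ih.1]),
        ih.1]
      simp

lemma pvRowsB_take_succ (vv : Char → Int) (bs : List Char) (as : List Char) (t : Nat)
    (ht : t < as.length) :
    pvRowsB vv bs (as.take (t + 1)) =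
      pvRowsStep vv bs (pvRowsB vv bs (as.take t)) as[t] := by
  rw [pvRowsB, List.take_succ_eq_append_getElem ht, List.foldl_append, List.foldl_cons,
    List.foldl_nil]
  rfl

lemma pvInner_conv (values : List (String × Int)) (as bs : List Char) (i : Int)
    (M : List (List Int)) :
    (PySem.List.pyRange 1 ((bs.length : Int) + 1) 1).foldl (pvAStep values as bs i) M =
      (List.range bs.length).foldl
        (fun (M : List (List Int)) (t : Nat) => pvAStep values as bs i M (1 + (t : Int))) M := by
  rw [PySem.List.pyRange_one]
  rw [show (((bs.length : Int) + 1 - 1).toNat) = bs.length from by omega]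
  rw [List.foldl_map]

-- the outer loop of A builds exactly the functional rows, padding with zero rows
lemma pvOuter_loop (values : List (String × Int)) (as bs : List Char) :
    ∀ n, n ≤ as.length →
      (List.range n).foldl
        (fun (M : List (List Int)) (t : Nat) =>
          (List.range bs.length).foldl
            (fun (M : List (List Int)) (k : Nat) =>
              pvAStep values as bs (1 + (t : Int)) M (1 + (k : Int))) M)
        (List.replicate (as.length + 1) (pvZ bs.length)) =
      (pvRowsB (pvVal values) bs (as.take n)).1 ++
        List.replicate (as.length - n) (pvZ bs.length) := by
  intro n
  induction n with
  | zero => simp [pvRowsB, pvZ, List.replicate_succ]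
  | succ t ih =>
    intro ht1
    have ht : t < as.length := by omega
    rw [List.range_succ, List.foldl_append, ih (by omega), List.foldl_cons, List.foldl_nil]
    set vv := pvVal values with hvv
    set rows := pvRowsB vv bs (as.take t) with hrows
    have hinv := pvRowsB_inv vv bs (as.take t)
    rw [← hrows] at hinv
    have htk : (as.take t).length = t := by simp; omega
    rw [htk] at hinv
    set Mt : List (List Int) := rows.1 ++ List.replicate (as.length - t) (pvZ bs.length)
      with hMt
    have hiM : t + 1 < Mt.length := by
      rw [hMt]; simp [hinv.1]; omega
    have hMp : Mt.getD ((t + 1) - 1) [] = rows.2 := by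
      rw [hMt, show t + 1 - 1 = t from rfl, List.getD_eq_getElem?_getD,
        List.getElem?_append_left (by omega), ← List.getD_eq_getElem?_getD, hinv.2.2]
    have hMi : Mt.getD (t + 1) [] = List.replicate (bs.length + 1) 0 := by
      rw [hMt, List.getD_eq_getElem?_getD, List.getElem?_append_right (by omega), hinv.1]
      have h0 : 0 < as.length - t := by omega
      simp [h0, pvZ]
    have hstep := pvInner_loop values as bs rows.2 hinv.2.1 (t + 1) (by omega) Mt hiM hMp hMi
      bs.length (le_refl _)
    have hcast : (1 + (t : Int)) = (((t + 1 : Nat) : Int)) := by push_cast; ring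
    rw [hcast, hstep]
    have hget : as.getD (t + 1 - 1) ' ' = as[t] := by
      rw [show t + 1 - 1 = t from rfl]; exact List.getD_eq_getElem as ' ' ht
    rw [Nat.sub_self, List.replicate_zero, List.append_nil, hget]
    rw [← pvNextRow_eq_pre vv as[t] bs rows.2 hinv.2.1]
    rw [pvRowsB_take_succ vv bs as t ht, ← hrows]
    rw [hMt, List.set_append_right _ _ (by omega), hinv.1, Nat.sub_self]
    rw [show as.length - t = (as.length - (t + 1)) + 1 from by omega, List.replicate_succ]
    simp [pvRowsStep]

-- A's port equals the functional rows construction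
lemma pvA_eq_rows (A B : String) (values : List (String × Int)) :
    HVLCS A B values =
      ((pvRowsB (pvVal values) B.toList A.toList).1,
        PySem.List.pyGetD (pvRowsB (pvVal values) B.toList A.toList).2 (-1) 0) := by
  rw [pvHVLCS_eq]
  set as := A.toList
  set bs := B.toList
  set vv := pvVal values with hvv
  have hconv : ∀ M : List (List Int),
      (PySem.List.pyRange 1 ((as.length : Int) + 1) 1).foldl (fun M i =>
        (PySem.List.pyRange 1 ((bs.length : Int) + 1) 1).foldl (pvAStep values as bs i) M) M =
      (List.range as.length).foldl
        (fun (M : List (List Int)) (t : Nat) =>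
          (List.range bs.length).foldl
            (fun (M : List (List Int)) (k : Nat) =>
              pvAStep values as bs (1 + (t : Int)) M (1 + (k : Int))) M) M := by
    intro M
    have houter : PySem.List.pyRange 1 ((as.length : Int) + 1) 1 =
        (List.range as.length).map (fun t : Nat => 1 + (t : Int)) := by
      rw [PySem.List.pyRange_one]; congr 2; omega
    rw [houter, List.foldl_map]
    exact List.foldl_ext _ _ M (fun M' t _ => pvInner_conv values as bs (1 + (t : Int)) M')
  have hM0 : ((PySem.List.pyRange 0 ((as.length : Int) + 1) 1).map (fun _ =>
      (PySem.List.pyRange 0 ((bs.length : Int) + 1) 1).map (fun _ => (0 : Int)))) =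
      List.replicate (as.length + 1) (pvZ bs.length) := by
    rw [List.map_const', List.map_const', PySem.List.length_pyRange_one,
      PySem.List.length_pyRange_one, pvZ]
    congr 1
  simp only [hconv, hM0]
  rw [pvOuter_loop values as bs as.length (le_refl _)]
  rw [List.take_of_length_le (le_refl _), Nat.sub_self, List.replicate_zero, List.append_nil]
  set rows := pvRowsB vv bs as with hrows
  have hinv := pvRowsB_inv vv bs as
  rw [← hrows] at hinv
  congr 1
  have hlast : PySem.List.pyGetD rows.1 (as.length : Int) [] = rows.2 := by
    rw [PySem.List.pyGetD_natCast, hinv.2.2]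
  rw [hlast]
  have hne : rows.2 ≠ [] := by
    intro h; rw [h] at hinv; simp at hinv
  rw [PySem.List.pyGetD_natCast, PySem.List.pyGetD_neg_one (h := hne),
    List.getLast_eq_getElem, List.getD_eq_getElem rows.2 0 (by omega)]
  congr 1
  omega

-- ---------- functional rows equal the canonical table ----------

lemma pvRowT_zero (vv : Char → Int) (asL bsL : List Char) :
    pvRowT vv asL bsL 0 = pvZ bsL.length := by
  rw [pvRowT, pvZ]
  rw [List.map_congr_left (fun j _ => pvT_zero vv asL bsL 0 j (Or.inl rfl))]
  simp [List.map_const']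

lemma pvRowT_length (vv : Char → Int) (asL bsL : List Char) (i : Nat) :
    (pvRowT vv asL bsL i).length = bsL.length + 1 := by simp [pvRowT]

lemma pvRowT_getElem (vv : Char → Int) (asL bsL : List Char) (i k : Nat)
    (hk : k < bsL.length + 1) :
    (pvRowT vv asL bsL i)[k]'(by rw [pvRowT_length]; exact hk) = pvT vv asL bsL i k := by
  simp [pvRowT]

lemma pvPre_T (vv : Char → Int) (asL bsL : List Char) (i : Nat) (hi : i < asL.length) :
    ∀ k, k ≤ bsL.length →
      pvPre vv (asL[i]) bsL (pvRowT vv asL bsL i) k =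
        ((List.range (k + 1)).map (fun j => pvT vv asL bsL (i + 1) j),
          pvT vv asL bsL (i + 1) k) := by
  have hlen := pvRowT_length vv asL bsL i
  intro k
  induction k with
  | zero =>
    intro _
    rw [pvPre, List.take_zero, List.foldl_nil]
    simp [pvT_zero vv asL bsL (i+1) 0 (Or.inr rfl)]
  | succ k ih =>
    intro hk1
    have hk : k < bsL.length := by omega
    rw [pvPre_succ vv (asL[i]) bsL (pvRowT vv asL bsL i) hlen k hk, ih (by omega)]
    rw [pvRowT_getElem vv asL bsL i k (by omega), pvRowT_getElem vv asL bsL i (k+1) (by omega)]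
    have hT : pvT vv asL bsL (i+1) (k+1) =
        if asL[i] = bsL[k] then
          max (vv (asL[i]) + pvT vv asL bsL i k)
            (max (pvT vv asL bsL i (k+1)) (pvT vv asL bsL (i+1) k))
        else max (pvT vv asL bsL i (k+1)) (pvT vv asL bsL (i+1) k) := by
      rw [pvT, dif_neg (by omega)]
      simp only [Nat.add_sub_cancel]
      rw [List.getD_eq_getElem asL ' ' hi, List.getD_eq_getElem bsL ' ' hk]
    rw [pvStep]
    simp only [← hT, List.range_succ, List.map_append, List.map_cons, List.map_nil]

lemma pvNextRow_T (vv : Char → Int) (asL bsL : List Char) (i : Nat) (hi : i < asL.length) :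
    pvNextRow vv (asL[i]) bsL (pvRowT vv asL bsL i) = pvRowT vv asL bsL (i + 1) := by
  rw [pvNextRow_eq_pre vv _ bsL _ (pvRowT_length vv asL bsL i),
    pvPre_T vv asL bsL i hi bsL.length (le_refl _)]
  rfl

lemma pvRowsB_T (vv : Char → Int) (asL bsL : List Char) :
    ∀ n, n ≤ asL.length →
      pvRowsB vv bsL (asL.take n) =
        ((List.range (n + 1)).map (pvRowT vv asL bsL), pvRowT vv asL bsL n) := by
  intro n
  induction n with
  | zero =>
    intro _
    rw [pvRowsB, List.take_zero, List.foldl_nil, pvRowT_zero]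
    simp [pvRowT_zero]
  | succ n ih =>
    intro hn1
    have hn : n < asL.length := by omega
    rw [pvRowsB_take_succ vv bsL asL n hn, ih (by omega), pvRowsStep]
    simp only [pvNextRow_T vv asL bsL n hn]
    rw [List.range_succ (n := n + 1), List.map_append]
    rfl

-- ---------- B-side: memoized recursion computes the canonical table ----------

def pvGood (vv : Char → Int) (asL bsL : List Char) (memo : PySem.Dict (Int × Int) Int) : Prop :=
  ∀ (i j : Nat) (v : Int), memo.get? ((i : Int), (j : Int)) = some v → v = pvT vv asL bsL i j

lemma pvGood_empty (vv : Char → Int) (asL bsL : List Char) :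
    pvGood vv asL bsL (PySem.Dict.mk []) := by
  intro i j v h
  simp [PySem.Dict.get?] at h

lemma pvGood_insert (vv : Char → Int) (asL bsL : List Char)
    (memo : PySem.Dict (Int × Int) Int) (hg : pvGood vv asL bsL memo) (i j : Nat) :
    pvGood vv asL bsL (memo.insert ((i : Int), (j : Int)) (pvT vv asL bsL i j)) := by
  intro i' j' v h
  rw [PySem.Dict.get?_insert] at h
  by_cases hk : ((i' : Int), (j' : Int)) = ((i : Int), (j : Int))
  · rw [if_pos hk] at h
    have hi : i' = i := by
      have := congrArg Prod.fst hk; simpa using this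
    have hj : j' = j := by
      have := congrArg Prod.snd hk; simpa using this
    cases h; rw [hi, hj]
  · rw [if_neg hk] at h
    exact hg i' j' v h

lemma pvRec_T (vv : Char → Int) (asL bsL : List Char) :
    ∀ (n i j : Nat), i + j ≤ n → ∀ memo, pvGood vv asL bsL memo →
      (pvRec asL bsL vv i j memo).2 = pvT vv asL bsL i j ∧
      pvGood vv asL bsL (pvRec asL bsL vv i j memo).1 := by
  intro n
  induction n with
  | zero =>
    intro i j hn memo hg
    have hi : i = 0 := by omega
    rw [pvRec, dif_pos (Or.inl hi)]
    exact ⟨(pvT_zero vv asL bsL i j (Or.inl hi)).symm, hg⟩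
  | succ n ih =>
    intro i j hn memo hg
    by_cases h0 : i = 0 ∨ j = 0
    · rw [pvRec, dif_pos h0]
      exact ⟨(pvT_zero vv asL bsL i j h0).symm, hg⟩
    · rw [pvRec, dif_neg h0]
      cases hget : memo.get? ((i : Int), (j : Int)) with
      | some v =>
        exact ⟨hg i j v hget, hg⟩
      | none =>
        have hij : i ≠ 0 ∧ j ≠ 0 := by push_neg at h0; exact h0
        by_cases hc : asL.getD (i - 1) ' ' = bsL.getD (j - 1) ' '
        · simp only [if_pos hc]
          have h1 := ih (i - 1) (j - 1) (by omega) memo hg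
          have h2 := ih (i - 1) j (by omega) _ h1.2
          have h3 := ih i (j - 1) (by omega) _ h2.2
          have hr : max (vv (asL.getD (i - 1) ' ') +
                (pvRec asL bsL vv (i - 1) (j - 1) memo).2)
              (max ((pvRec asL bsL vv (i - 1) j (pvRec asL bsL vv (i - 1) (j - 1) memo).1).2)
                ((pvRec asL bsL vv i (j - 1)
                  (pvRec asL bsL vv (i - 1) j (pvRec asL bsL vv (i - 1) (j - 1) memo).1).1).2)) =
              pvT vv asL bsL i j := by
            rw [h1.1, h2.1, h3.1, pvT_pos vv asL bsL i j h0, if_pos hc]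
          refine ⟨hr, ?_⟩
          rw [hr]
          exact pvGood_insert vv asL bsL _ h3.2 i j
        · simp only [if_neg hc]
          have h2 := ih (i - 1) j (by omega) memo hg
          have h3 := ih i (j - 1) (by omega) _ h2.2
          have hr : max ((pvRec asL bsL vv (i - 1) j memo).2)
              ((pvRec asL bsL vv i (j - 1) (pvRec asL bsL vv (i - 1) j memo).1).2) =
              pvT vv asL bsL i j := by
            rw [h2.1, h3.1, pvT_pos vv asL bsL i j h0, if_neg hc]
          refine ⟨hr, ?_⟩
          rw [hr]
          exact pvGood_insert vv asL bsL _ h3.2 i j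

-- the inner comprehension fold produces one table row (and keeps the memo good)
lemma pvCells_fold (vv : Char → Int) (asL bsL : List Char) (i : Nat) :
    ∀ (ks : List Nat) (memo : PySem.Dict (Int × Int) Int) (acc : List Int),
      pvGood vv asL bsL memo →
      (ks.foldl (fun (st2 : PySem.Dict (Int × Int) Int × List Int) j =>
          ((pvRec asL bsL vv i j st2.1).1, st2.2 ++ [(pvRec asL bsL vv i j st2.1).2]))
          (memo, acc)).2 =
        acc ++ ks.map (fun j => pvT vv asL bsL i j) ∧
      pvGood vv asL bsL ((ks.foldl (fun (st2 : PySem.Dict (Int × Int) Int × List Int) j =>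
          ((pvRec asL bsL vv i j st2.1).1, st2.2 ++ [(pvRec asL bsL vv i j st2.1).2]))
          (memo, acc)).1) := by
  intro ks
  induction ks with
  | nil => intro memo acc hg; simpa using hg
  | cons k ks ih =>
    intro memo acc hg
    have hrec := pvRec_T vv asL bsL (i + k) i k (le_refl _) memo hg
    simp only [List.foldl_cons]
    have hnext := ih (pvRec asL bsL vv i k memo).1
      (acc ++ [(pvRec asL bsL vv i k memo).2]) hrec.2
    refine ⟨?_, hnext.2⟩
    rw [hnext.1, hrec.1]
    simp

-- the outer comprehension fold produces the table rows
lemma pvRows_fold (vv : Char → Int) (asL bsL : List Char) :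
    ∀ (is : List Nat) (memo : PySem.Dict (Int × Int) Int) (acc : List (List Int)),
      pvGood vv asL bsL memo →
      (is.foldl (fun (st : PySem.Dict (Int × Int) Int × List (List Int)) i =>
          (((List.range (bsL.length + 1)).foldl
              (fun (st2 : PySem.Dict (Int × Int) Int × List Int) j =>
                ((pvRec asL bsL vv i j st2.1).1, st2.2 ++ [(pvRec asL bsL vv i j st2.1).2]))
              (st.1, ([] : List Int))).1,
            st.2 ++ [((List.range (bsL.length + 1)).foldl
              (fun (st2 : PySem.Dict (Int × Int) Int × List Int) j =>
                ((pvRec asL bsL vv i j st2.1).1, st2.2 ++ [(pvRec asL bsL vv i j st2.1).2]))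
              (st.1, ([] : List Int))).2])) (memo, acc)).2 =
        acc ++ is.map (pvRowT vv asL bsL) ∧
      pvGood vv asL bsL ((is.foldl (fun (st : PySem.Dict (Int × Int) Int × List (List Int)) i =>
          (((List.range (bsL.length + 1)).foldl
              (fun (st2 : PySem.Dict (Int × Int) Int × List Int) j =>
                ((pvRec asL bsL vv i j st2.1).1, st2.2 ++ [(pvRec asL bsL vv i j st2.1).2]))
              (st.1, ([] : List Int))).1,
            st.2 ++ [((List.range (bsL.length + 1)).foldl
              (fun (st2 : PySem.Dict (Int × Int) Int × List Int) j =>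
                ((pvRec asL bsL vv i j st2.1).1, st2.2 ++ [(pvRec asL bsL vv i j st2.1).2]))
              (st.1, ([] : List Int))).2])) (memo, acc)).1) := by
  intro is
  induction is with
  | nil => intro memo acc hg; simpa using hg
  | cons i is ih =>
    intro memo acc hg
    have hcells := pvCells_fold vv asL bsL i (List.range (bsL.length + 1)) memo [] hg
    simp only [List.foldl_cons]
    have hnext := ih ((List.range (bsL.length + 1)).foldl
        (fun (st2 : PySem.Dict (Int × Int) Int × List Int) j =>
          ((pvRec asL bsL vv i j st2.1).1, st2.2 ++ [(pvRec asL bsL vv i j st2.1).2]))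
        (memo, ([] : List Int))).1
      (acc ++ [((List.range (bsL.length + 1)).foldl
        (fun (st2 : PySem.Dict (Int × Int) Int × List Int) j =>
          ((pvRec asL bsL vv i j st2.1).1, st2.2 ++ [(pvRec asL bsL vv i j st2.1).2]))
        (memo, ([] : List Int))).2]) hcells.2
    refine ⟨?_, hnext.2⟩
    rw [hnext.1, hcells.1]
    simp [pvRowT]

-- B's port equals the table matrix and corner
lemma pvAlt_eq (A B : String) (values : List (String × Int)) :
    HVLCS_alt A B values =
      ((List.range (A.toList.length + 1)).map (pvRowT (pvVal values) A.toList B.toList),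
        pvT (pvVal values) A.toList B.toList A.toList.length B.toList.length) := by
  have hn : ∀ n : Nat, ((((n : Nat) : Int) + 1) - 0).toNat = n + 1 := by intro n; omega
  simp only [HVLCS_alt, PySem.List.pyRange_one, hn, List.foldl_map, zero_add,
    Int.toNat_natCast]
  set asL := A.toList
  set bsL := B.toList
  set vv := pvVal values with hvv
  have key : ∀ (f2 : List (List Int)),
      f2 = (List.range (asL.length + 1)).map (pvRowT vv asL bsL) →
      (f2, PySem.List.pyGetD (PySem.List.pyGetD f2 (asL.length : Int) []) (bsL.length : Int) 0) =
        ((List.range (asL.length + 1)).map (pvRowT vv asL bsL),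
          pvT vv asL bsL asL.length bsL.length) := by
    intro f2 hf2
    subst hf2
    congr 1
    simp only [PySem.List.pyGetD_natCast]
    rw [List.getD_eq_getElem _ [] (by simp), List.getElem_map, List.getElem_range,
      List.getD_eq_getElem _ 0 (by rw [pvRowT_length]; omega)]
    exact pvRowT_getElem vv asL bsL asL.length bsL.length (by omega)
  exact key _ (by
    have hmain := pvRows_fold vv asL bsL (List.range (asL.length + 1)) (PySem.Dict.mk [])
      [] (pvGood_empty vv asL bsL)
    simpa using hmain.1)

-- ===== VERDICT (by name: the statement is the Claim_ definition above) =====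
theorem HVLCS_spec : Claim_equal_HVLCS := by
  unfold Claim_equal_HVLCS
  intro A B values _ _
  unfold Spec_HVLCS
  rw [pvA_eq_rows, pvAlt_eq]
  set asL := A.toList
  set bsL := B.toList
  set vv := pvVal values with hvv
  have hrows := pvRowsB_T vv asL bsL asL.length (le_refl _)
  rw [List.take_of_length_le (le_refl _)] at hrows
  rw [hrows]
  congr 1
  have hne : pvRowT vv asL bsL asL.length ≠ [] := by
    intro h
    have := pvRowT_length vv asL bsL asL.length
    rw [h] at this; simp at this
  rw [PySem.List.pyGetD_neg_one (h := hne), List.getLast_eq_getElem]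
  simp [pvRowT]
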